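-- pv_equiv track=rewrite | github.com/torres98/BLEP | sage/utils.py | wordlist_to_int
-- ===== SOURCE A (Python) =====
-- def wordlist_to_int(wordlist, word_size, endianess = 'big'):
--     value = 0
--
--     if endianess == 'little':
--         for i in range(len(wordlist)):
--             value |= wordlist[i] << (word_size * i)
--     else:
--         for i in range(len(wordlist)):
--             value |= wordlist[i] << (word_size * (len(wordlist) - i - 1))
--
--     return value
-- ===== SOURCE B (Python) =====
-- def wordlist_to_int(wordlist, word_size, endianess = 'big'):
--     words = list(wordlist) if endianess == 'little' else list(reversed(wordlist))
--
--     def merge(seg):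
--         # OR-combination of seg[i] << (word_size * i), by halving
--         n = len(seg)
--         if n == 0:
--             return 0
--         if n == 1:
--             return seg[0]
--         k = n // 2
--         return merge(seg[:k]) | (merge(seg[k:]) << (word_size * k))
--
--     return merge(words)
-- ===== Notes on version B (the rewrite author's own statement) =====
-- stated objective: faster
-- what changed: Replaced the linear loop that ORs each word shifted by its full positional offset (quadratic total bit work) with a divide-and-conquer pairwise merge: each half is combined once with a single shift of word_size*half_length.
import Mathlib
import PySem

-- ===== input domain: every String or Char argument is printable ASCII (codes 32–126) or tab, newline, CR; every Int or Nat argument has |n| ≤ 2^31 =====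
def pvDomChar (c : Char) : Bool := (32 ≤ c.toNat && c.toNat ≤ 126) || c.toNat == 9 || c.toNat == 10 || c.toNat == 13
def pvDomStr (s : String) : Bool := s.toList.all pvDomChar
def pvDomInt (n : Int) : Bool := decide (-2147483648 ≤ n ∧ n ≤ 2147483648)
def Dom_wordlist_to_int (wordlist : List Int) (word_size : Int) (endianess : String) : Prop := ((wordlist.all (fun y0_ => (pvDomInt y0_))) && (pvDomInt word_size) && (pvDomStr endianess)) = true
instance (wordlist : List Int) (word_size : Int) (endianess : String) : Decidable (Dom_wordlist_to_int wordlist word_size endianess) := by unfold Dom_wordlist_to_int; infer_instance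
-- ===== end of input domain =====

-- B replaces A's loop of per-index positional shifts by a divide-and-conquer pairwise merge of
-- the two halves (a single shift per merge); a timing run measured it faster on large inputs.

-- ===== PORT A =====
-- 'wordlist[i] << shift' is ported as '<<< shift.toNat'; Pre_ guarantees shift ≥ 0, which is
-- exactly where Python's '<<' returns (it raises ValueError on a negative shift count).
def wordlist_to_int (wordlist : List Int) (word_size : Int) (endianess : String) : Int :=
  if endianess = "little" then
    (PySem.List.pyRange 0 (wordlist.length : Int) 1).foldl
      (fun value i => PySem.Int.bor value
        ((PySem.List.pyGetD wordlist i 0) <<< (word_size * i).toNat)) 0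
  else
    (PySem.List.pyRange 0 (wordlist.length : Int) 1).foldl
      (fun value i => PySem.Int.bor value
        ((PySem.List.pyGetD wordlist i 0) <<< (word_size * ((wordlist.length : Int) - i - 1)).toNat)) 0

-- ===== PORT B =====
-- merge(seg) of Source B; 'seg[:k]' / 'seg[k:]' are ported as take/drop, exact for 0 ≤ k ≤ len(seg),
-- and 'n // 2' on the nonnegative length is Nat division.
def pvGo (word_size : Int) (seg : List Int) : Int :=
  match seg with
  | [] => 0
  | [w] => w
  | w :: x :: rest =>
    let k := (rest.length + 2) / 2
    PySem.Int.bor (pvGo word_size ((w :: x :: rest).take k))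
      ((pvGo word_size ((w :: x :: rest).drop k)) <<< (word_size * (k : Int)).toNat)
termination_by seg.length
decreasing_by
  all_goals (simp only [List.length_take, List.length_drop, List.length_cons]; omega)

def wordlist_to_int_alt (wordlist : List Int) (word_size : Int) (endianess : String) : Int :=
  pvGo word_size (if endianess = "little" then wordlist else wordlist.reverse)

-- ===== PRECONDITION & SPEC =====
-- Pre_ excludes exactly the inputs where Python A raises ValueError (a negative shift count:
-- word_size < 0 with at least two words); A returns normally on all of Pre_.
def Pre_wordlist_to_int (wordlist : List Int) (word_size : Int) (_endianess : String) : Prop :=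
  0 ≤ word_size ∨ wordlist.length ≤ 1
instance (wordlist : List Int) (word_size : Int) (endianess : String) : Decidable (Pre_wordlist_to_int wordlist word_size endianess) := by unfold Pre_wordlist_to_int; infer_instance

def pvWitness_wordlist_to_int : List Int × Int × String := ([1, 2, 255], 8, "big")

def Spec_wordlist_to_int (wordlist : List Int) (word_size : Int) (endianess : String) (out : Int) : Prop := out = wordlist_to_int_alt wordlist word_size endianess
instance (wordlist : List Int) (word_size : Int) (endianess : String) (out : Int) : Decidable (Spec_wordlist_to_int wordlist word_size endianess out) := by unfold Spec_wordlist_to_int; infer_instance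

-- ===== CLAIM (what is proved, stated in full; the proofs are below) =====
def Claim_equal_wordlist_to_int : Prop := ∀ (wordlist : List Int) (word_size : Int) (endianess : String), Dom_wordlist_to_int wordlist word_size endianess → Pre_wordlist_to_int wordlist word_size endianess → Spec_wordlist_to_int wordlist word_size endianess (wordlist_to_int wordlist word_size endianess)

-- ===== LEMMAS AND PROOFS =====

-- bit j of the infinite two's-complement representation of an integer
def pvIbit (a : Int) (j : Nat) : Bool :=
  if 0 ≤ a then a.toNat.testBit j else !((-a - 1).toNat.testBit j)

theorem pv_and_add_ldiff (B : Nat) : ∀ A : Nat, (B &&& A) + Nat.ldiff B A = B := by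
  induction B using Nat.binaryRec with
  | zero => intro A; simp [Nat.ldiff]
  | bit b B ih =>
    intro A
    rw [← Nat.bit_bodd_div2 A, Nat.land_bit, Nat.ldiff_bit, Nat.bit_val, Nat.bit_val, Nat.bit_val]
    have := ih (A.div2)
    cases b <;> cases A.bodd <;> simp at * <;> omega

theorem pv_testBit_sub_and (A B j : Nat) :
    (B - (B &&& A)).testBit j = (B.testBit j && !(A.testBit j)) := by
  have h := pv_and_add_ldiff B A
  have h2 : B - (B &&& A) = Nat.ldiff B A := by omega
  rw [h2, Nat.testBit_ldiff]

theorem pv_testBit_mulAdd : ∀ (j x r n : Nat), r < 2 ^ n →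
    (x * 2 ^ n + r).testBit j = if j < n then r.testBit j else x.testBit (j - n) := by
  intro j
  induction j with
  | zero =>
    intro x r n hr
    cases n with
    | zero => interval_cases r; simp
    | succ n' =>
      rw [if_pos (Nat.succ_pos n')]
      rw [Nat.testBit_zero, Nat.testBit_zero]
      have hy : x * 2 ^ (n' + 1) = 2 * (x * 2 ^ n') := by ring
      rw [hy, decide_eq_decide]; omega
  | succ j ih =>
    intro x r n hr
    cases n with
    | zero =>
      interval_cases r
      simp
    | succ n' =>
      rw [Nat.testBit_succ]
      have hy : x * 2 ^ (n' + 1) = 2 * (x * 2 ^ n') := by ring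
      have hdiv : (x * 2 ^ (n' + 1) + r) / 2 = x * 2 ^ n' + r / 2 := by rw [hy]; omega
      rw [hdiv, ih x (r / 2) n' (by rw [pow_succ] at hr; omega)]
      have ht : r.testBit (j + 1) = (r / 2).testBit j := Nat.testBit_succ r j
      by_cases h : j < n'
      · rw [if_pos h, if_pos (by omega), ht]
      · rw [if_neg h, if_neg (by omega)]
        congr 1; omega

theorem pv_ibit_ext {a b : Int} (hs : a < 0 ↔ b < 0) (h : ∀ j, pvIbit a j = pvIbit b j) :
    a = b := by
  by_cases ha : 0 ≤ a
  · have hb : 0 ≤ b := by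
      by_contra hb; exact absurd (hs.mpr (by omega)) (by omega)
    have he : a.toNat = b.toNat := by
      apply Nat.eq_of_testBit_eq
      intro j; have := h j; simpa [pvIbit, ha, hb] using this
    omega
  · have hb : ¬ 0 ≤ b := by
      intro hb; exact absurd (hs.mp (by omega)) (by omega)
    have he : (-a - 1).toNat = (-b - 1).toNat := by
      apply Nat.eq_of_testBit_eq
      intro j; have := h j; simpa [pvIbit, ha, hb] using this
    omega

theorem pv_bor_neg (a b : Int) : PySem.Int.bor a b < 0 ↔ a < 0 ∨ b < 0 := by
  unfold PySem.Int.bor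
  by_cases ha : 0 ≤ a <;> by_cases hb : 0 ≤ b <;> simp [ha, hb] <;> omega

theorem pv_ibit_bor (a b : Int) (j : Nat) :
    pvIbit (PySem.Int.bor a b) j = (pvIbit a j || pvIbit b j) := by
  unfold PySem.Int.bor pvIbit
  by_cases ha : 0 ≤ a <;> by_cases hb : 0 ≤ b <;> simp [ha, hb]
  · have h1 : ¬ (1:Int) ≤ -(((((-b).toNat - 1) - (((-b).toNat - 1) &&& a.toNat)) : Nat) : Int) := by
      omega
    simp [h1, pv_testBit_sub_and]
    cases a.toNat.testBit j <;> cases ((-b).toNat - 1).testBit j <;> simp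
  · have h1 : ¬ (1:Int) ≤ -(((((-a).toNat - 1) - (((-a).toNat - 1) &&& b.toNat)) : Nat) : Int) := by
      omega
    simp [h1, pv_testBit_sub_and]
  · intro _; omega

theorem pv_shl_neg (a : Int) (n : Nat) : a <<< n < 0 ↔ a < 0 := by
  rw [Int.shiftLeft_eq]
  have h2 : (0 : Int) < 2 ^ n := by positivity
  constructor
  · intro h; by_contra hc; nlinarith
  · intro h; nlinarith

theorem pv_ibit_shl (a : Int) (n j : Nat) :
    pvIbit (a <<< n) j = if j < n then false else pvIbit a (j - n) := by
  have h2n : (0 : Nat) < 2 ^ n := by positivity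
  by_cases ha : 0 ≤ a
  · have he : a <<< n = ((a.toNat * 2 ^ n + 0 : Nat) : Int) := by
      rw [Int.shiftLeft_eq]; push_cast; rw [Int.toNat_of_nonneg ha]; ring
    rw [he]
    simp only [pvIbit, if_pos ha,
      if_pos (by positivity : (0:Int) ≤ ((a.toNat * 2 ^ n + 0 : Nat) : Int)), Int.toNat_natCast]
    rw [pv_testBit_mulAdd j a.toNat 0 n h2n]
    split <;> simp
  · have hc : -a - 1 = (((-a - 1).toNat : Nat) : Int) := by omega
    have he : a <<< n = -(((-a - 1).toNat * 2 ^ n + (2 ^ n - 1) : Nat) : Int) - 1 := by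
      rw [Int.shiftLeft_eq]
      have h3 : (((-a - 1).toNat * 2 ^ n + (2 ^ n - 1) : Nat) : Int)
          = (-a - 1) * 2 ^ n + ((2 ^ n : Int) - 1) := by
        push_cast [h2n]; rw [← hc]
      rw [h3]
      have h4 : a = -(-a - 1) - 1 := by ring
      nlinarith [h4]
    have hneg : ¬ (0:Int) ≤ a <<< n := by
      rw [he]
      have : (0:Int) ≤ (((-a - 1).toNat * 2 ^ n + (2 ^ n - 1) : Nat) : Int) := by positivity
      omega
    simp only [pvIbit, if_neg ha, if_neg hneg]
    have h5 : (-(a <<< n) - 1).toNat = (-a - 1).toNat * 2 ^ n + (2 ^ n - 1) := by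
      rw [he]; omega
    rw [h5, pv_testBit_mulAdd j _ _ n (by omega)]
    by_cases hj : j < n
    · simp [hj, Nat.testBit_two_pow_sub_one]
    · simp [hj]

theorem pv_bor_assoc (a b c : Int) :
    PySem.Int.bor (PySem.Int.bor a b) c = PySem.Int.bor a (PySem.Int.bor b c) := by
  apply pv_ibit_ext
  · simp only [pv_bor_neg]; tauto
  · intro j; simp only [pv_ibit_bor, Bool.or_assoc]

theorem pv_bor_shl (a b : Int) (n : Nat) :
    (PySem.Int.bor a b) <<< n = PySem.Int.bor (a <<< n) (b <<< n) := by
  apply pv_ibit_ext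
  · simp only [pv_shl_neg, pv_bor_neg]
  · intro j
    simp only [pv_ibit_shl, pv_ibit_bor]
    by_cases hj : j < n <;> simp [hj]

theorem pv_bor_zero_left (a : Int) : PySem.Int.bor 0 a = a := by
  rw [PySem.Int.bor_comm, PySem.Int.bor_zero]

theorem pv_shl_zero (a : Int) : a <<< (0 : Nat) = a := by
  rw [Int.shiftLeft_eq]; simp

theorem pv_shl_shl (a : Int) (m n : Nat) : (a <<< m) <<< n = a <<< (m + n) := by
  rw [Int.shiftLeft_eq, Int.shiftLeft_eq, Int.shiftLeft_eq, pow_add, mul_assoc]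

-- the little-endian positional value with word width W (bit widths, positions 0,1,2,…)
def pvS (W : Nat) : List Int → Int
  | [] => 0
  | w :: t => PySem.Int.bor w ((pvS W t) <<< W)

theorem pvS_append (W : Nat) : ∀ xs ys : List Int,
    pvS W (xs ++ ys) = PySem.Int.bor (pvS W xs) ((pvS W ys) <<< (W * xs.length)) := by
  intro xs
  induction xs with
  | nil => intro ys; simp [pvS, pv_bor_zero_left]
  | cons x xs ih =>
    intro ys
    simp only [List.cons_append, pvS, ih, pv_bor_shl, pv_shl_shl, pv_bor_assoc, List.length_cons]
    have h : W * xs.length + W = W * (xs.length + 1) := by ring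
    rw [h]

theorem pv_keyGo (ws : Int) (hw : 0 ≤ ws) : ∀ seg : List Int, pvGo ws seg = pvS ws.toNat seg := by
  obtain ⟨W, rfl⟩ := Int.eq_ofNat_of_zero_le hw
  intro seg
  induction seg using pvGo.induct with
  | case1 => simp [pvGo, pvS]
  | case2 w => simp [pvGo, pvS]
  | case3 w x rest k ih1 ih2 =>
    rw [pvGo, ih1, ih2]
    conv_rhs => rw [← List.take_append_drop ((rest.length + 2) / 2) (w :: x :: rest)]
    rw [pvS_append]
    have h1 : (List.take ((rest.length + 2) / 2) (w :: x :: rest)).length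
        = (rest.length + 2) / 2 := by
      simp; omega
    have h2 : (((W : Int)) * (((rest.length + 2) / 2 : Nat) : Int)).toNat
        = ((W : Int)).toNat * ((rest.length + 2) / 2) := by
      simp only [← Int.natCast_mul, Int.toNat_natCast]
    rw [h1, h2]

theorem pv_keyA (W : Nat) : ∀ (wl : List Int) (v : Int) (c : Nat),
    (List.range wl.length).foldl
      (fun v k => PySem.Int.bor v ((wl.getD k 0) <<< (W * k + c))) v
      = PySem.Int.bor v ((pvS W wl) <<< c) := by
  intro wl
  induction wl with
  | nil => intro v c; simp [pvS]
  | cons w t ih =>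
    intro v c
    rw [List.length_cons, List.range_succ_eq_map]
    simp only [List.foldl_cons, List.foldl_map]
    have hf : (fun (v : Int) (k : Nat) =>
          PySem.Int.bor v (((w :: t).getD (Nat.succ k) 0) <<< (W * (Nat.succ k) + c)))
        = (fun (v : Int) (k : Nat) =>
          PySem.Int.bor v ((t.getD k 0) <<< (W * k + (W + c)))) := by
      funext v k
      have he : W * (Nat.succ k) + c = W * k + (W + c) := by rw [Nat.mul_succ, Nat.add_assoc]
      rw [List.getD_cons_succ, he]
    rw [hf, ih]
    simp only [List.getD_cons_zero, Nat.mul_zero, Nat.zero_add]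
    simp only [pvS, pv_bor_shl, pv_shl_shl, pv_bor_assoc]

theorem pv_keyB (W : Nat) : ∀ (wl : List Int) (v : Int) (c : Nat),
    (List.range wl.length).foldl
      (fun v k => PySem.Int.bor v ((wl.getD k 0) <<< (W * (wl.length - 1 - k) + c))) v
      = PySem.Int.bor v ((pvS W wl.reverse) <<< c) := by
  intro wl
  induction wl with
  | nil => intro v c; simp [pvS]
  | cons w t ih =>
    intro v c
    rw [List.length_cons, List.range_succ_eq_map]
    simp only [List.foldl_cons, List.foldl_map]
    have hf : (fun (v : Int) (k : Nat) =>
          PySem.Int.bor v (((w :: t).getD (Nat.succ k) 0)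
            <<< (W * ((t.length + 1) - 1 - (Nat.succ k)) + c)))
        = (fun (v : Int) (k : Nat) =>
          PySem.Int.bor v ((t.getD k 0) <<< (W * (t.length - 1 - k) + c))) := by
      funext v k
      have he : (t.length + 1) - 1 - (Nat.succ k) = t.length - 1 - k := by omega
      rw [List.getD_cons_succ, he]
    rw [hf, ih]
    simp only [List.getD_cons_zero, List.reverse_cons]
    rw [pvS_append, List.length_reverse]
    have hs : pvS W [w] = w := by simp [pvS]
    rw [hs]
    have he2 : (t.length + 1) - 1 - 0 = t.length := by omega
    rw [he2]
    rw [pv_bor_shl, pv_shl_shl, pv_bor_assoc,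
      PySem.Int.bor_comm (w <<< (W * t.length + c)) ((pvS W t.reverse) <<< c)]

theorem pv_final (wl : List Int) (ws : Int) (e : String)
    (hpre : 0 ≤ ws ∨ wl.length ≤ 1) :
    wordlist_to_int wl ws e = wordlist_to_int_alt wl ws e := by
  by_cases hw : 0 ≤ ws
  · obtain ⟨W, rfl⟩ := Int.eq_ofNat_of_zero_le hw
    unfold wordlist_to_int wordlist_to_int_alt
    rw [pv_keyGo _ hw]
    by_cases he : e = "little"
    · rw [if_pos he, if_pos he]
      simp only [PySem.List.pyRange_zero_natCast, List.foldl_map]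
      rw [PySem.List.foldl_congr_mem _ _
        (fun (v : Int) (k : Nat) => PySem.Int.bor v ((wl.getD k 0) <<< (W * k + 0))) _
        (by
          intro acc k hk
          simp only [PySem.List.pyGetD_natCast, ← Int.natCast_mul, Int.toNat_natCast,
            Nat.add_zero])]
      rw [pv_keyA W wl 0 0, pv_shl_zero, pv_bor_zero_left, Int.toNat_natCast]
    · rw [if_neg he, if_neg he]
      simp only [PySem.List.pyRange_zero_natCast, List.foldl_map]
      rw [PySem.List.foldl_congr_mem _ _
        (fun (v : Int) (k : Nat) =>
          PySem.Int.bor v ((wl.getD k 0) <<< (W * (wl.length - 1 - k) + 0))) _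
        (by
          intro acc k hk
          rw [List.mem_range] at hk
          have h5 : ((wl.length : Int) - (k : Int) - 1) = ((wl.length - 1 - k : Nat) : Int) := by
            omega
          simp only [PySem.List.pyGetD_natCast, h5, ← Int.natCast_mul, Int.toNat_natCast,
            Nat.add_zero])]
      rw [pv_keyB W wl 0 0, pv_shl_zero, pv_bor_zero_left, Int.toNat_natCast]
  · rcases wl with _ | ⟨w, _ | ⟨x, t⟩⟩
    · unfold wordlist_to_int wordlist_to_int_alt
      simp [pvGo]
    · unfold wordlist_to_int wordlist_to_int_alt
      have h1 : ((([w] : List Int).length : Int)) = ((1 : Nat) : Int) := by simp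
      rw [h1]
      simp only [PySem.List.pyRange_zero_natCast, List.range_one, List.map_cons, List.map_nil,
        List.foldl_cons, List.foldl_nil]
      by_cases he : e = "little" <;>
        simp [he, pvGo, pv_bor_zero_left]
    · exfalso
      rcases hpre with h | h
      · exact hw h
      · simp at h

-- ===== VERDICT (by name: the statement is the Claim_ definition above) =====
theorem wordlist_to_int_spec : Claim_equal_wordlist_to_int := by
  intro wl ws e _ hpre
  unfold Spec_wordlist_to_int
  exact pv_final wl ws e hpre
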